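-- pv_equiv track=rewrite | github.com/pabdominguez98/algo-1 | diccionarios/3/main.py | calcular_campeon
-- ===== SOURCE A (Python) =====
-- def calcular_campeon(estadisticas):
--     maximo = 0
--     campeon = ()
--     for clave in estadisticas:
--         puntos = int(estadisticas[clave][0]*3) + int(estadisticas[clave][1])
--         if puntos > maximo:
--             campeon = (clave, puntos)
--             maximo = puntos
--
--     return campeon
-- ===== SOURCE B (Python) =====
-- def calcular_campeon(estadisticas):
--     pares = [(clave, int(estadisticas[clave][0] * 3) + int(estadisticas[clave][1]))
--              for clave in estadisticas]
--     pares = sorted(pares, key=lambda p: p[1], reverse=True)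
--     if not pares or pares[0][1] <= 0:
--         return ()
--     return pares[0]
-- ===== Notes on version B (the rewrite author's own statement) =====
-- stated objective: alternative
-- what changed: Replaces the running-max scan with two staged passes: build a (clave, puntos) list, stable-sort it descending by puntos (ties keep dict insertion order), and pick the head if its points are positive.
-- outside the precondition, e.g. on calcular_campeon({'a': [0, 0]}): A returns (), B returns (); on calcular_campeon({}): A returns (), B returns ()
import Mathlib
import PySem

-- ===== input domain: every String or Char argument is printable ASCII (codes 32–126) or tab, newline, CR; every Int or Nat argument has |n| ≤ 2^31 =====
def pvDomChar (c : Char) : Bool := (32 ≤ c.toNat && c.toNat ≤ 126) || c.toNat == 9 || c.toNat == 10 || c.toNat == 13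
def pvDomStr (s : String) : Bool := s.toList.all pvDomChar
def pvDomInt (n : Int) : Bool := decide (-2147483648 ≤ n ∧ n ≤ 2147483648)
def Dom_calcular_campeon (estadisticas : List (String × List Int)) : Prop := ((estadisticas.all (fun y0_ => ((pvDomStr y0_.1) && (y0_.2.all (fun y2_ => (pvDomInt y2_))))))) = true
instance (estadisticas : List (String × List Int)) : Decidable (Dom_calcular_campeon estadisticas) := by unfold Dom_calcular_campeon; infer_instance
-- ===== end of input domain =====

-- B replaces A's running-max scan with staged passes: build the (clave, puntos) list,
-- stable-sort it descending by puntos, and pick the head if its points are positive.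


-- ===== PORT A =====
-- puntos = int(stats[0]*3) + int(stats[1]); exact for 2 ≤ stats.length (guaranteed by
-- Pre_; Python raises IndexError on shorter lists, where pyGet? returns none).
def pyPts (stats : List Int) : Int :=
  (PySem.List.pyGet? stats 0).getD 0 * 3 + (PySem.List.pyGet? stats 1).getD 0

-- literal port of A: running max (starting at 0) with champion in an Option;
-- '.getD ("", 0)' only renders Python's final '()' (excluded by Pre_) as a value of the type.
def calcular_campeon (estadisticas : List (String × List Int)) : String × Int :=
  (estadisticas.foldl
    (fun (st : Int × Option (String × Int)) kv =>
      let puntos := pyPts ((PySem.Dict.mk estadisticas).getD kv.1 [])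
      if puntos > st.1 then (puntos, some (kv.1, puntos)) else st)
    (0, none)).2.getD ("", 0)

-- ===== PORT B =====
-- literal port of Source B: the (clave, puntos) comprehension (with the same dict lookup),
-- then sorted(pares, key=lambda p: p[1], reverse=True) = PySem.List.sorted … true,
-- then head test; ("", 0) renders Python's () (outside Pre_).
def calcular_campeon_alt (estadisticas : List (String × List Int)) : String × Int :=
  let pares := estadisticas.map
    (fun kv => (kv.1, pyPts ((PySem.Dict.mk estadisticas).getD kv.1 [])))
  match PySem.List.sorted pares (fun p => p.2) true with
  | [] => ("", 0)
  | p :: _ => if p.2 ≤ 0 then ("", 0) else p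

-- ===== PRECONDITION & SPEC =====
-- Pre_ excludes: inputs where no team has positive puntos (there Python A returns the
-- empty tuple (), which is not a (str, int) pair); value lists shorter than 2 (IndexError);
-- duplicate keys (impossible in a Python dict — the assoc list must satisfy the dict invariant).
def Pre_calcular_campeon (estadisticas : List (String × List Int)) : Prop :=
  (estadisticas.map Prod.fst).Nodup ∧
  (∀ kv ∈ estadisticas, 2 ≤ kv.2.length) ∧
  (∃ kv ∈ estadisticas,
    0 < (PySem.List.pyGet? kv.2 0).getD 0 * 3 + (PySem.List.pyGet? kv.2 1).getD 0)
instance (estadisticas : List (String × List Int)) : Decidable (Pre_calcular_campeon estadisticas) := by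
  unfold Pre_calcular_campeon; infer_instance

def pvWitness_calcular_campeon : (List (String × List Int)) := [("a", [1, 0])]

def Spec_calcular_campeon (estadisticas : List (String × List Int)) (out : String × Int) : Prop := out = calcular_campeon_alt estadisticas
instance (estadisticas : List (String × List Int)) (out : String × Int) : Decidable (Spec_calcular_campeon estadisticas out) := by unfold Spec_calcular_campeon; infer_instance

-- ===== CLAIM (what is proved, stated in full; the proofs are below) =====
def Claim_equal_calcular_campeon : Prop := ∀ (estadisticas : List (String × List Int)), Dom_calcular_campeon estadisticas → Pre_calcular_campeon estadisticas → Spec_calcular_campeon estadisticas (calcular_campeon estadisticas)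

-- ===== LEMMAS AND PROOFS =====

-- A's loop body over the precomputed (clave, puntos) pair.
def stepA (st : Int × Option (String × Int)) (p : String × Int) : Int × Option (String × Int) :=
  if p.2 > st.1 then (p.2, some p) else st

-- running "first maximal element" accumulator (ties keep the earlier element)
def stepG (b p : String × Int) : String × Int :=
  if b.2 < p.2 then p else b

-- the value B extracts from the chosen pair
def altval (p : String × Int) : String × Int :=
  if p.2 > 0 then p else ("", 0)

-- the insertion step of PySem's stable descending insertion sort, key = p.2
def ins (acc : List (String × Int)) (p : String × Int) : List (String × Int) :=
  PySem.List.insertBy (fun a b => decide ((b.2 : Int) < a.2)) p acc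

theorem head?_ins (p h : String × Int) (t : List (String × Int)) :
    (ins (h :: t) p).head? = some (stepG h p) := by
  simp only [ins, PySem.List.insertBy, stepG]
  split_ifs with hlt <;> simp_all

theorem head?_foldl_ins (t : List (String × Int)) :
    ∀ (acc : List (String × Int)) (h : String × Int), acc.head? = some h →
      (t.foldl ins acc).head? = some (t.foldl stepG h) := by
  induction t with
  | nil => intro acc h hh; simpa using hh
  | cons p t ih =>
      intro acc h hh
      cases acc with
      | nil => simp at hh
      | cons a rest =>
          simp only [Option.some.injEq, List.head?_cons] at hh
          subst hh
          simpa using ih (ins (a :: rest) p) (stepG a p) (head?_ins p a rest)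

theorem head?_sorted (x : String × Int) (t : List (String × Int)) :
    (PySem.List.sorted (x :: t) (fun p => p.2) true).head? = some (t.foldl stepG x) := by
  rw [PySem.List.sorted_rev_eq_foldl_insertBy]
  simpa [ins] using head?_foldl_ins t [x] x rfl

theorem pts_le_foldl_stepG (t : List (String × Int)) (b : String × Int) :
    b.2 ≤ (t.foldl stepG b).2 := by
  induction t generalizing b with
  | nil => exact le_refl _
  | cons y t ih =>
      simp only [List.foldl_cons, stepG]
      split_ifs with h
      · exact le_trans (le_of_lt h) (ih y)
      · exact ih b

theorem foldl_stepA_pos (t : List (String × Int)) (b : String × Int) :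
    t.foldl stepA (b.2, some b)
      = ((t.foldl stepG b).2, some (t.foldl stepG b)) := by
  induction t generalizing b with
  | nil => rfl
  | cons y t ih =>
      simp only [List.foldl_cons, stepA, stepG]
      split_ifs with h
      · exact ih y
      · exact ih b

theorem altval_foldl_nonpos (t : List (String × Int)) (b b' : String × Int)
    (hb : b.2 ≤ 0) (hb' : b'.2 ≤ 0) :
    altval (t.foldl stepG b) = altval (t.foldl stepG b') := by
  induction t generalizing b b' with
  | nil => simp [altval, not_lt.2 hb, not_lt.2 hb']
  | cons y t ih =>
      simp only [List.foldl_cons, stepG]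
      split_ifs with h1 h2 h2
      · rfl
      · exact ih y b' (le_trans (le_of_not_gt h2) hb') hb'
      · exact ih b y hb (le_trans (le_of_not_gt h1) hb)
      · exact ih b b' hb hb'

theorem main_fold (l : List (String × Int)) :
    (l.foldl stepA (0, none)).2.getD ("", 0)
      = match l with
        | [] => ("", 0)
        | x :: t => altval (t.foldl stepG x) := by
  induction l with
  | nil => rfl
  | cons x t ih =>
      by_cases hp : x.2 > 0
      · have h0 : stepA (0, none) x = (x.2, some x) := by simp [stepA, hp]
        simp only [List.foldl_cons, h0, foldl_stepA_pos]
        have hw : (t.foldl stepG x).2 > 0 :=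
          lt_of_lt_of_le hp (pts_le_foldl_stepG t x)
        simp [altval, hw]
      · have h0 : stepA (0, none) x = (0, none) := by simp [stepA, hp]
        simp only [List.foldl_cons, h0, ih]
        cases t with
        | nil => simp [altval, hp]
        | cons y t' =>
            show altval (t'.foldl stepG y) = altval (t'.foldl stepG (stepG x y))
            simp only [stepG]
            split_ifs with h
            · rfl
            · exact altval_foldl_nonpos t' y x
                (le_trans (le_of_not_gt h) (le_of_not_gt hp)) (le_of_not_gt hp)

theorem find?_self {l : List (String × List Int)} (hnd : (l.map Prod.fst).Nodup)
    {kv : String × List Int} (hmem : kv ∈ l) :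
    l.find? (fun p => p.1 == kv.1) = some kv := by
  induction l with
  | nil => cases hmem
  | cons x t ih =>
      simp only [List.map_cons, List.nodup_cons] at hnd
      rcases List.mem_cons.1 hmem with rfl | h
      · exact List.find?_cons_of_pos (by simp)
      · have hx : ¬ ((fun p => p.1 == kv.1) x : Bool) = true := by
          have hm : kv.1 ∈ t.map Prod.fst := List.mem_map_of_mem h
          simp only [beq_iff_eq]
          intro e
          exact hnd.1 (e ▸ hm)
        rw [show List.find? (fun p => p.1 == kv.1) (x :: t)
              = List.find? (fun p => p.1 == kv.1) t by
            simp only [List.find?_cons]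
            simp [hx]]
        exact ih hnd.2 h

theorem lookup_self {l : List (String × List Int)} (hnd : (l.map Prod.fst).Nodup)
    {kv : String × List Int} (hmem : kv ∈ l) :
    (PySem.Dict.mk l).getD kv.1 [] = kv.2 := by
  simp [PySem.Dict.getD, PySem.Dict.get?, find?_self hnd hmem]

-- ===== VERDICT (by name: the statement is the Claim_ definition above) =====
theorem calcular_campeon_spec : Claim_equal_calcular_campeon := by
  intro est _ hpre
  obtain ⟨hnd, _, _⟩ := hpre
  unfold Spec_calcular_campeon calcular_campeon calcular_campeon_alt
  -- resolve the dict lookups (keys are Nodup) and express A as a fold over the pairs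
  have hmap :
      est.map (fun kv => (kv.1, pyPts ((PySem.Dict.mk est).getD kv.1 [])))
        = est.map (fun kv => (kv.1, pyPts kv.2)) :=
    List.map_congr_left (fun kv hmem => by rw [lookup_self hnd hmem])
  have hfold :
      est.foldl
        (fun (st : Int × Option (String × Int)) kv =>
          let puntos := pyPts ((PySem.Dict.mk est).getD kv.1 [])
          if puntos > st.1 then (puntos, some (kv.1, puntos)) else st)
        (0, none)
      = (est.map (fun kv => (kv.1, pyPts kv.2))).foldl stepA (0, none) := by
    rw [List.foldl_map]
    apply PySem.List.foldl_congr_mem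
    intro st kv hmem
    simp [stepA, lookup_self hnd hmem]
  rw [hmap, hfold, main_fold]
  cases hP : est.map (fun kv => (kv.1, pyPts kv.2)) with
  | nil => rfl
  | cons x t =>
      have hs := head?_sorted x t
      cases hsrt : PySem.List.sorted (x :: t) (fun p => p.2) true with
      | nil => rw [hsrt] at hs; simp at hs
      | cons p rest =>
          rw [hsrt] at hs
          simp only [List.head?_cons, Option.some.injEq] at hs
          subst hs
          simp only [hsrt]
          show (if (t.foldl stepG x).2 > 0 then t.foldl stepG x else ("", 0))
              = (if (t.foldl stepG x).2 ≤ 0 then ("", 0) else t.foldl stepG x)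
          split_ifs with h1 h2 h3
          · omega
          · rfl
          · rfl
          · omega
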